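-- pv_equiv track=rewrite | github.com/assignment-helper-y/assnhelp | superpower.py | findConsecutives
-- ===== SOURCE A (Python) =====
-- def findConsecutives(len_pair, lis):
--     """  Find all possible Consective , Find their Sum"""
--     consecutive_sum = []
--     for i in range(len(lis) - len_pair + 1):
--
--         pair = ["", ""]
--         pair[0] = sum(lis[i: i+len_pair])  # The consecutive --
--         pair[1] = sum(lis) - pair[0]
--         consecutive_sum.append(pair)
--
--     return consecutive_sum
-- ===== SOURCE B (Python) =====
-- def findConsecutives(len_pair, lis):
--     """Sliding window: one pass with a running window sum; no windows for negative length."""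
--     if len_pair < 0:
--         return []
--     n = len(lis)
--     total = sum(lis)
--     window = sum(lis[:len_pair])
--     out = []
--     for i in range(n - len_pair + 1):
--         out.append([window, total - window])
--         if i + len_pair < n:
--             window += lis[i + len_pair] - lis[i]
--     return out
-- ===== Notes on version B (the rewrite author's own statement) =====
-- stated objective: faster
-- what changed: Replaces the per-window re-summation sum(lis[i:i+len_pair]) (and a re-computed sum(lis) each iteration) with one precomputed total and an O(1) sliding-window update per step.
-- intended difference: For negative len_pair A returns len(lis)-len_pair+1 pairs whose first components come from accidental negative-slice wraparound of lis[i:i+len_pair]; B returns [], the intended answer since no window has negative length. — e.g. on findConsecutives(-1, [1, 2]): A returns [[1, 2], [0, 3], [0, 3], [0, 3]], B returns []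
import Mathlib
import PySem

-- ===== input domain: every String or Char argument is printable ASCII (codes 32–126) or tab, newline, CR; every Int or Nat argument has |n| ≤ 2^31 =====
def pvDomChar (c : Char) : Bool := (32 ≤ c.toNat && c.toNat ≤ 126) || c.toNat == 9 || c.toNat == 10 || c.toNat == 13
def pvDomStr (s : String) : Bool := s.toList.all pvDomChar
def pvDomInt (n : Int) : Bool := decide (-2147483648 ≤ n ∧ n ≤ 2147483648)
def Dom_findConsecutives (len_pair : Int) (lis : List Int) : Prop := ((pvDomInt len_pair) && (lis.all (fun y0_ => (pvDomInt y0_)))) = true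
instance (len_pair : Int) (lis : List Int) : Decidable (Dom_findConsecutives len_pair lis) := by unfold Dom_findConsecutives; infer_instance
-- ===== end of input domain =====

-- B replaces A's per-window slice re-summation with one total and an O(1) sliding-window update (faster);
-- for negative len_pair B returns [] where A's negative-slice wraparound produced accidental values (see D_).

-- ===== PORT A =====
-- for i in range(len(lis) - len_pair + 1): pair = [sum(lis[i:i+len_pair]), sum(lis) - pair[0]]; append
def findConsecutives (len_pair : Int) (lis : List Int) : List (List Int) :=
  (PySem.List.pyRange 0 ((lis.length : Int) - len_pair + 1) 1).foldl
    (fun acc i =>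
      let p0 := (PySem.List.slice lis (some i) (some (i + len_pair))).sum
      let p1 := lis.sum - p0
      acc ++ [[p0, p1]]) []

-- ===== PORT B =====
-- sliding window: state = (out, window); lis[j] is in range on every taken branch, ported as pyGetD _ _ 0
def findConsecutives_alt (len_pair : Int) (lis : List Int) : List (List Int) :=
  if len_pair < 0 then []
  else
    let n : Int := (lis.length : Int)
    let total := lis.sum
    let w0 := (PySem.List.slice lis none (some len_pair)).sum
    ((PySem.List.pyRange 0 (n - len_pair + 1) 1).foldl
      (fun (st : List (List Int) × Int) i =>
        let out := st.1 ++ [[st.2, total - st.2]]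
        let w := if i + len_pair < n then
                   st.2 + (PySem.List.pyGetD lis (i + len_pair) 0 - PySem.List.pyGetD lis i 0)
                 else st.2
        (out, w)) ([], w0)).1

-- ===== PRECONDITION & SPEC =====
-- For negative len_pair A returns len(lis)-len_pair+1 pairs whose first components come from accidental
-- negative-slice wraparound of lis[i:i+len_pair]; B returns [], the intended answer (no window has negative length).
def D_findConsecutives (len_pair : Int) (lis : List Int) : Prop := len_pair < 0
instance (len_pair : Int) (lis : List Int) : Decidable (D_findConsecutives len_pair lis) := by unfold D_findConsecutives; infer_instance
def Spec_findConsecutives (len_pair : Int) (lis : List Int) (out : List (List Int)) : Prop := ¬ D_findConsecutives len_pair lis → out = findConsecutives_alt len_pair lis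
instance (len_pair : Int) (lis : List Int) (out : List (List Int)) : Decidable (Spec_findConsecutives len_pair lis out) := by unfold Spec_findConsecutives; infer_instance
def pvDiffWitness_findConsecutives : Int × List Int := (-1, [1, 2])
def pvDiffWitnessOut_findConsecutives : (List (List Int)) × (List (List Int)) := ([[1, 2], [0, 3], [0, 3], [0, 3]], [])

-- ===== CLAIM (what is proved, stated in full; the proofs are below) =====
def Claim_unchanged_findConsecutives : Prop := ∀ (len_pair : Int) (lis : List Int), Dom_findConsecutives len_pair lis → Spec_findConsecutives len_pair lis (findConsecutives len_pair lis)
def Claim_changed_findConsecutives : Prop := Dom_findConsecutives (pvDiffWitness_findConsecutives.1) (pvDiffWitness_findConsecutives.2) ∧ D_findConsecutives (pvDiffWitness_findConsecutives.1) (pvDiffWitness_findConsecutives.2) ∧ findConsecutives (pvDiffWitness_findConsecutives.1) (pvDiffWitness_findConsecutives.2) = pvDiffWitnessOut_findConsecutives.1 ∧ findConsecutives_alt (pvDiffWitness_findConsecutives.1) (pvDiffWitness_findConsecutives.2) = pvDiffWitnessOut_findConsecutives.2 ∧ pvDiffWitnessOut_findConsecutives.1 ≠ pvDiffWitnessOu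t_findConsecutives.2
def Claim_exact_findConsecutives : Prop := ∀ (len_pair : Int) (lis : List Int), Dom_findConsecutives len_pair lis → D_findConsecutives len_pair lis → findConsecutives len_pair lis ≠ findConsecutives_alt len_pair lis

-- ===== LEMMAS AND PROOFS =====

-- window sum of A at position i
def pvWin (lis : List Int) (len_pair i : Int) : Int :=
  (PySem.List.slice lis (some i) (some (i + len_pair))).sum

-- sliding-window step identity
lemma pvSlide (lis : List Int) (A L : Nat) (h : A + L < lis.length) :
  ((lis.drop (A+1)).take L).sum = ((lis.drop A).take L).sum + lis[A+L] - lis[A] := by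
  have h2 : lis.drop A = lis[A] :: lis.drop (A+1) := List.drop_eq_getElem_cons (by omega)
  have h1 : (lis.drop A).take (L+1) = (lis.drop A).take L ++ [lis[A+L]] := by
    rw [List.take_add_one]
    congr 1
    rw [List.getElem?_drop, List.getElem?_eq_getElem (by omega : A+L < lis.length)]
    rfl
  have hB : (lis.drop A).take (L+1) = lis[A] :: (lis.drop (A+1)).take L := by
    rw [h2, List.take_succ_cons]
  have s1 := congrArg List.sum h1
  have s2 := congrArg List.sum hB
  simp [List.sum_append] at s1 s2
  omega

lemma pvWin_step (lis : List Int) (len_pair i : Int) (hl : 0 ≤ len_pair) (hi : 0 ≤ i)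
    (hin : i + len_pair < (lis.length : Int)) :
    pvWin lis len_pair (i + 1) =
      pvWin lis len_pair i + (PySem.List.pyGetD lis (i + len_pair) 0 - PySem.List.pyGetD lis i 0) := by
  have hA : i.toNat + len_pair.toNat < lis.length := by omega
  have e1 : pvWin lis len_pair i = ((lis.drop i.toNat).take len_pair.toNat).sum := by
    rw [pvWin, PySem.List.slice_toNat lis (by omega) (by omega)]
    have : (i + len_pair).toNat - i.toNat = len_pair.toNat := by omega
    rw [this]
  have e2 : pvWin lis len_pair (i+1) = ((lis.drop (i.toNat + 1)).take len_pair.toNat).sum := by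
    rw [pvWin, PySem.List.slice_toNat lis (by omega) (by omega)]
    have h5 : (i + 1).toNat = i.toNat + 1 := by omega
    rw [h5]
    have h6 : (i + 1 + len_pair).toNat - (i.toNat + 1) = len_pair.toNat := by omega
    rw [h6]
  have e3 : PySem.List.pyGetD lis (i + len_pair) 0 = lis[i.toNat + len_pair.toNat] := by
    rw [PySem.List.pyGetD_eq_getElem lis 0 (by omega) (by omega)]
    simp only [show (i + len_pair).toNat = i.toNat + len_pair.toNat from by omega]
  have e4 : PySem.List.pyGetD lis i 0 = lis[i.toNat] := by
    rw [PySem.List.pyGetD_eq_getElem lis 0 hi (by omega)]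
  rw [e1, e2, e3, e4, pvSlide lis i.toNat len_pair.toNat hA]
  ring

lemma pvLoop (lis : List Int) (len_pair : Int) (hl : 0 ≤ len_pair) :
    ∀ (k : Nat) (a : Int) (acc : List (List Int)) (w : Int), 0 ≤ a →
      (((lis.length : Int) - len_pair + 1) - a).toNat = k →
      w = pvWin lis len_pair a →
      ((PySem.List.pyRange a ((lis.length : Int) - len_pair + 1) 1).foldl
        (fun (st : List (List Int) × Int) i =>
          let out := st.1 ++ [[st.2, lis.sum - st.2]]
          let w' := if i + len_pair < (lis.length : Int) then
                      st.2 + (PySem.List.pyGetD lis (i + len_pair) 0 - PySem.List.pyGetD lis i 0)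
                    else st.2
          (out, w')) (acc, w)).1
      = acc ++ (PySem.List.pyRange a ((lis.length : Int) - len_pair + 1) 1).map
          (fun i => [pvWin lis len_pair i, lis.sum - pvWin lis len_pair i]) := by
  intro k
  induction k with
  | zero =>
    intro a acc w ha hk hw
    rw [PySem.List.pyRange_one_eq_nil (by omega)]
    simp
  | succ k ih =>
    intro a acc w ha hk hw
    have hab : a < (lis.length : Int) - len_pair + 1 := by omega
    rw [PySem.List.pyRange_one_cons hab]
    simp only [List.foldl_cons, List.map_cons]
    by_cases hend : (lis.length : Int) - len_pair + 1 ≤ a + 1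
    · rw [PySem.List.pyRange_one_eq_nil hend]
      simp [hw]
    · have hlt : a + len_pair < (lis.length : Int) := by omega
      rw [if_pos hlt]
      rw [ih (a+1) (acc ++ [[w, lis.sum - w]]) _ (by omega) (by omega)
          (by rw [hw, ← pvWin_step lis len_pair a hl ha hlt])]
      simp [hw]

-- ===== VERDICT (by name: the statement is the Claim_ definition above) =====
theorem findConsecutives_spec : Claim_unchanged_findConsecutives := by
  intro len_pair lis hdom
  unfold Spec_findConsecutives
  intro hnd
  have hl : 0 ≤ len_pair := by unfold D_findConsecutives at hnd; omega
  unfold findConsecutives findConsecutives_alt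
  rw [if_neg (by omega)]
  simp only []
  rw [pvLoop lis len_pair hl ((((lis.length : Int) - len_pair + 1) - 0).toNat) 0 [] _ le_rfl rfl
      (by simp [pvWin])]
  rw [PySem.List.foldl_append_singleton_eq_map]
  simp [pvWin]

theorem findConsecutives_changed : Claim_changed_findConsecutives := by
  unfold Claim_changed_findConsecutives; decide

theorem findConsecutives_tight : Claim_exact_findConsecutives := by
  intro len_pair lis hdom hd
  unfold D_findConsecutives at hd
  unfold findConsecutives findConsecutives_alt
  rw [if_pos hd]
  intro heq
  have hlen := congrArg List.length heq
  rw [PySem.List.foldl_append_singleton_eq_map] at hlen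
  simp [PySem.List.length_pyRange_one] at hlen
  omega
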